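-- pv_equiv track=rewrite | github.com/hayleycd/project-polyglot | pythonlang/probs1_5/problem_5_python.py | optimize_list
-- ===== SOURCE A (Python) =====
-- def optimize_list(upper_limit):
-- 	my_list = [each for each in range(1, upper_limit + 1)]
-- 	optimize_list = []
--
-- 	for index in range(len(my_list)):
-- 		redundant = False
-- 		for next in range(index + 1, len(my_list)):
-- 			if my_list[next] % my_list[index] == 0:
-- 				redundant = True
-- 				break
-- 		if redundant == False:
-- 			optimize_list.append(my_list[index])
-- 	return optimize_list
-- ===== SOURCE B (Python) =====
-- def optimize_list(upper_limit):
--     # x in 1..n has a multiple strictly after it iff 2x <= n, so keep x with x > n//2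
--     return list(range(upper_limit // 2 + 1, upper_limit + 1))
-- ===== Notes on version B (the rewrite author's own statement) =====
-- stated objective: faster
-- what changed: Replaces the O(n^2) nested scan for a later multiple by the closed form list(range(n//2+1, n+1)): x in 1..n has a multiple in the range iff 2x <= n.
import Mathlib
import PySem

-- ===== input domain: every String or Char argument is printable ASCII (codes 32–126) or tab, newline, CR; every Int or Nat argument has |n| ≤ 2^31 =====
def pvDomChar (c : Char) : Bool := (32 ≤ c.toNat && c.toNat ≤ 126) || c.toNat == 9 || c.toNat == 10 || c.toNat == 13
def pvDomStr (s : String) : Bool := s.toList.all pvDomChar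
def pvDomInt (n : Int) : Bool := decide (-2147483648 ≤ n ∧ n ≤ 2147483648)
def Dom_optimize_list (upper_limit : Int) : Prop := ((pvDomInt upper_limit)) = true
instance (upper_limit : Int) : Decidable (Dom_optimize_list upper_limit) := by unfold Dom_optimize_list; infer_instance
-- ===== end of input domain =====

-- B replaces A's quadratic redundant-multiple scan by the closed form range(n//2+1, n+1): asymptotically faster.

-- ===== PORT A =====
def optimize_list (upper_limit : Int) : List Int :=
  let my_list := PySem.List.pyRange 1 (upper_limit + 1) 1
  (PySem.List.pyRange 0 (my_list.length : Int) 1).foldl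
    (fun acc index =>
      let redundant :=
        (PySem.List.pyRange (index + 1) (my_list.length : Int) 1).any
          (fun next =>
            PySem.Int.mod (PySem.List.pyGetD my_list next 0)
              (PySem.List.pyGetD my_list index 0) == 0)
      if redundant == false then acc ++ [PySem.List.pyGetD my_list index 0] else acc)
    []

-- ===== PORT B =====
def optimize_list_alt (upper_limit : Int) : List Int :=
  PySem.List.pyRange (PySem.Int.floordiv upper_limit 2 + 1) (upper_limit + 1) 1

-- ===== PRECONDITION & SPEC =====
def Spec_optimize_list (upper_limit : Int) (out : List Int) : Prop := out = optimize_list_alt upper_limit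
instance (upper_limit : Int) (out : List Int) : Decidable (Spec_optimize_list upper_limit out) := by unfold Spec_optimize_list; infer_instance

-- ===== CLAIM (what is proved, stated in full; the proofs are below) =====
def Claim_equal_optimize_list : Prop := ∀ (upper_limit : Int), Dom_optimize_list upper_limit → Spec_optimize_list upper_limit (optimize_list upper_limit)

-- ===== LEMMAS AND PROOFS =====

-- element at index j of [1..n] is 1 + j
lemma myList_get (n j : Int) (h0 : 0 ≤ j) (h1 : j < n) :
    PySem.List.pyGetD (PySem.List.pyRange 1 (n + 1) 1) j 0 = 1 + j := by
  have hlen : (PySem.List.pyRange 1 (n + 1) 1).length = (n : Int).toNat := by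
    simp [PySem.List.length_pyRange_one]
  have hlt : j < ((PySem.List.pyRange 1 (n + 1) 1).length : Int) := by
    rw [hlen]; omega
  rw [PySem.List.pyGetD_eq_getElem _ 0 h0 hlt, PySem.List.getElem_pyRange_one]
  omega

-- A's inner loop: index i (0 ≤ i < n) is "redundant" exactly when 2*(i+1) ≤ n
lemma inner_any (n i : Int) (h0 : 0 ≤ i) (h1 : i < n) :
    ((PySem.List.pyRange (i + 1) n 1).any
      (fun next =>
        PySem.Int.mod (PySem.List.pyGetD (PySem.List.pyRange 1 (n + 1) 1) next 0)
          (PySem.List.pyGetD (PySem.List.pyRange 1 (n + 1) 1) i 0) == 0))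
    = decide (2 * (i + 1) ≤ n) := by
  have key : ((PySem.List.pyRange (i + 1) n 1).any
      (fun next =>
        PySem.Int.mod (PySem.List.pyGetD (PySem.List.pyRange 1 (n + 1) 1) next 0)
          (PySem.List.pyGetD (PySem.List.pyRange 1 (n + 1) 1) i 0) == 0)) = true
      ↔ 2 * (i + 1) ≤ n := by
    simp only [List.any_eq_true, PySem.List.mem_pyRange_one, beq_iff_eq]
    constructor
    · rintro ⟨next, ⟨hlo, hhi⟩, hmod⟩
      rw [myList_get n next (by omega) hhi, myList_get n i h0 h1,
        PySem.Int.mod_eq_zero_iff_dvd] at hmod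
      obtain ⟨k, hk⟩ := hmod
      have hk2 : 2 ≤ k := by nlinarith
      nlinarith
    · intro h2
      refine ⟨2 * i + 1, ⟨by omega, by omega⟩, ?_⟩
      rw [myList_get n (2 * i + 1) (by omega) (by omega), myList_get n i h0 h1,
        PySem.Int.mod_eq_zero_iff_dvd]
      exact ⟨2, by ring⟩
  by_cases h2 : 2 * (i + 1) ≤ n
  · simp only [h2, decide_true]; exact key.mpr h2
  · simp only [h2, decide_false]
    cases hb : ((PySem.List.pyRange (i + 1) n 1).any _) with
    | false => rfl
    | true => exact absurd (key.mp hb) h2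

-- a threshold filter of a range is the tail range
lemma filter_range (t n : Int) (h0 : 0 ≤ t) (h1 : t ≤ n) :
    (PySem.List.pyRange 0 n 1).filter (fun i => decide (t ≤ i)) = PySem.List.pyRange t n 1 := by
  rw [PySem.List.pyRange_one_append 0 t n h0 h1, List.filter_append]
  have left : (PySem.List.pyRange 0 t 1).filter (fun i => decide (t ≤ i)) = [] := by
    rw [List.filter_eq_nil_iff]
    intro x hx
    have := PySem.List.mem_pyRange_one.mp hx
    simp; omega
  have right : (PySem.List.pyRange t n 1).filter (fun i => decide (t ≤ i)) = PySem.List.pyRange t n 1 := by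
    rw [List.filter_eq_self]
    intro x hx
    have := PySem.List.mem_pyRange_one.mp hx
    simp; omega
  rw [left, right, List.nil_append]

-- shifting a range by one
lemma map_add_one_range (a b : Int) :
    (PySem.List.pyRange a b 1).map (fun j => 1 + j) = PySem.List.pyRange (a + 1) (b + 1) 1 := by
  rw [PySem.List.pyRange_one a b, PySem.List.pyRange_one (a + 1) (b + 1), List.map_map]
  have : (b + 1 - (a + 1)).toNat = (b - a).toNat := by omega
  rw [this]
  apply List.map_congr_left
  intro k _
  simp; ring

-- ===== VERDICT (by name: the statement is the Claim_ definition above) =====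
theorem optimize_list_spec : Claim_equal_optimize_list := by
  intro n _
  show optimize_list n = optimize_list_alt n
  have hdiv : PySem.Int.floordiv n 2 = n / 2 := PySem.Int.floordiv_eq_ediv_of_pos (by omega)
  unfold optimize_list optimize_list_alt
  simp only []
  have hlen : (PySem.List.pyRange 1 (n + 1) 1).length = (n : Int).toNat := by
    simp [PySem.List.length_pyRange_one]
  by_cases hn : n ≤ 0
  · have h0 : ((PySem.List.pyRange 1 (n + 1) 1).length : Int) = 0 := by rw [hlen]; omega
    rw [h0, PySem.List.pyRange_one_eq_nil (le_refl 0), List.foldl_nil,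
      PySem.List.pyRange_one_eq_nil (by omega : n + 1 ≤ PySem.Int.floordiv n 2 + 1)]
  · replace hn : 0 < n := by omega
    have h0 : ((PySem.List.pyRange 1 (n + 1) 1).length : Int) = n := by rw [hlen]; omega
    rw [h0]
    rw [PySem.List.foldl_append_if
      (fun index =>
        ((PySem.List.pyRange (index + 1) n 1).any
          (fun next =>
            PySem.Int.mod (PySem.List.pyGetD (PySem.List.pyRange 1 (n + 1) 1) next 0)
              (PySem.List.pyGetD (PySem.List.pyRange 1 (n + 1) 1) index 0) == 0)) == false)
      (fun index => PySem.List.pyGetD (PySem.List.pyRange 1 (n + 1) 1) index 0)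
      (PySem.List.pyRange 0 n 1) []]
    rw [List.nil_append]
    have hfc : (PySem.List.pyRange 0 n 1).filter
        (fun index =>
          ((PySem.List.pyRange (index + 1) n 1).any
            (fun next =>
              PySem.Int.mod (PySem.List.pyGetD (PySem.List.pyRange 1 (n + 1) 1) next 0)
                (PySem.List.pyGetD (PySem.List.pyRange 1 (n + 1) 1) index 0) == 0)) == false)
        = (PySem.List.pyRange 0 n 1).filter (fun i => decide (n / 2 ≤ i)) := by
      apply List.filter_congr
      intro i hi
      obtain ⟨hi0, hi1⟩ := PySem.List.mem_pyRange_one.mp hi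
      rw [inner_any n i hi0 hi1]
      by_cases h2 : 2 * (i + 1) ≤ n
      · have : ¬ (n / 2 ≤ i) := by omega
        simp [h2, this]
      · have : n / 2 ≤ i := by omega
        simp [h2, this]
    rw [hfc, filter_range (n / 2) n (by omega) (by omega)]
    have hmc : (PySem.List.pyRange (n / 2) n 1).map
        (fun index => PySem.List.pyGetD (PySem.List.pyRange 1 (n + 1) 1) index 0)
        = (PySem.List.pyRange (n / 2) n 1).map (fun j => 1 + j) := by
      apply List.map_congr_left
      intro j hj
      obtain ⟨hj0, hj1⟩ := PySem.List.mem_pyRange_one.mp hj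
      exact myList_get n j (by omega) hj1
    rw [hmc, map_add_one_range, hdiv]
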